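-- pv_equiv track=rewrite | github.com/Djara2/dconsole-python | dtools.py | longestItem
-- ===== SOURCE A (Python) =====
-- def lenLongestItem(workingList):
--     lenCurrentLongest = 0
--     for x in range(0, len(workingList)):
--         if len(workingList[x]) > lenCurrentLongest:
--             lenCurrentLongest = len(workingList[x])
--     return(lenCurrentLongest)
--
-- def longestItem(workingList):
--     lengthLookingFor = lenLongestItem(workingList)
--     longestItem = ""
--     for x in range(0, len(workingList)):
--         if len(workingList[x]) == lengthLookingFor:
--             longestItem = workingList[x]
--             break
--     return(longestItem)
-- ===== SOURCE B (Python) =====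
-- def longestItem(workingList):
--     longest = ""
--     for item in workingList:
--         if len(item) > len(longest):
--             longest = item
--     return longest
-- ===== Notes on version B (the rewrite author's own statement) =====
-- stated objective: simpler
-- what changed: Replaced the two-pass design (helper computing the max length, then a second indexed scan for the first item of that length) with one direct pass keeping the current longest item, updated only on strictly greater length so ties keep the first.
import Mathlib
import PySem

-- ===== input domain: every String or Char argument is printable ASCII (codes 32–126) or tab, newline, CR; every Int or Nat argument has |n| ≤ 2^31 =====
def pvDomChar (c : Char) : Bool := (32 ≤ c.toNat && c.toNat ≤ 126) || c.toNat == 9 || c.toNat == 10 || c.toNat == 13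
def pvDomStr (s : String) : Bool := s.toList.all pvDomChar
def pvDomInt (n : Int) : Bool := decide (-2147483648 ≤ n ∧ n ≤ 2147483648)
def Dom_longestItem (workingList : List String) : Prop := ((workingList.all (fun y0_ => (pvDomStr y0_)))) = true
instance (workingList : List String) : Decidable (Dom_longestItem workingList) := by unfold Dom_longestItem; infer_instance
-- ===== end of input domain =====

-- B replaces A's two passes (max length, then re-scan for the first item of that length) by one
-- pass keeping the current longest item (strict '>' so ties keep the first); objective: simpler.

-- ===== PORT A =====
-- helper lenLongestItem: A's first loop, the running maximum of the lengths
def lenLongestItem (workingList : List String) : Nat :=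
  workingList.foldl
    (fun lenCurrentLongest x =>
      if x.toList.length > lenCurrentLongest then x.toList.length else lenCurrentLongest) 0

-- A's second loop: scan for the first item of the target length; 'break' = return on first hit,
-- '""' is the initial value returned when no iteration matches
def longestItemLoop : List String → Nat → String
  | [], _ => ""
  | x :: rest, target => if x.toList.length = target then x else longestItemLoop rest target

def longestItem (workingList : List String) : String :=
  longestItemLoop workingList (lenLongestItem workingList)

-- ===== PORT B =====
def longestItem_alt (workingList : List String) : String :=
  workingList.foldl
    (fun longest item =>
      if item.toList.length > longest.toList.length then item else longest) ""

-- ===== PRECONDITION & SPEC =====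
def Spec_longestItem (workingList : List String) (out : String) : Prop := out = longestItem_alt workingList
instance (workingList : List String) (out : String) : Decidable (Spec_longestItem workingList out) := by unfold Spec_longestItem; infer_instance

-- ===== CLAIM (what is proved, stated in full; the proofs are below) =====
def Claim_equal_longestItem : Prop := ∀ (workingList : List String), Dom_longestItem workingList → Spec_longestItem workingList (longestItem workingList)

-- ===== LEMMAS AND PROOFS =====

-- A's scan loop is 'first element of the target length, else ""'
theorem loop_eq_find : ∀ (l : List String) (t : Nat),
    longestItemLoop l t = ((l.find? fun s => s.toList.length == t).getD "") := by
  intro l t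
  induction l with
  | nil => rfl
  | cons x rest ih =>
    by_cases h : x.toList.length = t
    · rw [longestItemLoop, if_pos h, List.find?_cons_of_pos (by simpa using h)]
      rfl
    · rw [longestItemLoop, if_neg h, List.find?_cons_of_neg (by simpa using h), ih]

-- the running maximum never drops below its start value
theorem le_lenFold : ∀ (l : List String) (a : Nat),
    a ≤ l.foldl (fun acc s => if s.toList.length > acc then s.toList.length else acc) a := by
  intro l
  induction l with
  | nil => intro a; simp
  | cons x rest ih =>
    intro a
    simp only [List.foldl]
    refine le_trans ?_ (ih _)
    split <;> omega

-- B's single pass returns the first element of acc :: l whose length is the running maximum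
theorem altFold_eq : ∀ (l : List String) (acc : String),
    l.foldl (fun longest item =>
        if item.toList.length > longest.toList.length then item else longest) acc
      = (((acc :: l).find? fun s =>
            s.toList.length ==
              l.foldl (fun a s => if s.toList.length > a then s.toList.length else a)
                acc.toList.length).getD "") := by
  intro l
  induction l with
  | nil =>
    intro acc
    rw [List.foldl_nil, List.foldl_nil, List.find?_cons_of_pos (by simp)]
    rfl
  | cons x rest ih =>
    intro acc
    simp only [List.foldl]
    by_cases h : x.toList.length > acc.toList.length
    · rw [if_pos h, ih x, if_pos h]
      have hle := le_lenFold rest x.toList.length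
      set M := rest.foldl (fun a s => if s.toList.length > a then s.toList.length else a)
        x.toList.length with hMdef
      have hpacc : (acc.toList.length == M) = false := by
        simp only [beq_eq_false_iff_ne, ne_eq]
        omega
      simp only [List.find?, hpacc]
    · rw [if_neg h, ih acc, if_neg h]
      have hle := le_lenFold rest acc.toList.length
      set M := rest.foldl (fun a s => if s.toList.length > a then s.toList.length else a)
        acc.toList.length with hMdef
      by_cases hacc : acc.toList.length = M
      · have hpacc : (acc.toList.length == M) = true := by simpa using hacc
        simp only [List.find?, hpacc]
      · have hpacc : (acc.toList.length == M) = false := by simpa using hacc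
        have hpx : (x.toList.length == M) = false := by
          simp only [beq_eq_false_iff_ne, ne_eq]
          omega
        simp only [List.find?, hpacc, hpx]

-- ===== VERDICT (by name: the statement is the Claim_ definition above) =====
theorem longestItem_spec : Claim_equal_longestItem := by
  intro l _
  show longestItem l = longestItem_alt l
  rw [longestItem, longestItem_alt, loop_eq_find, altFold_eq, lenLongestItem]
  have h0 : ("" : String).toList.length = 0 := by rfl
  rw [h0]
  set M := l.foldl (fun a s => if s.toList.length > a then s.toList.length else a) 0 with hMdef
  by_cases hM : (0 : Nat) = M
  · -- max length is 0: A finds the first string of length 0, which is ""; B returns "" at once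
    have hp : (("" : String).toList.length == M) = true := by
      rw [h0, ← hM]
      rfl
    simp only [List.find?, hp]
    cases hf : l.find? fun s => s.toList.length == M with
    | none => rfl
    | some s =>
      have hs := List.find?_some hf
      have hsz : s = "" := by
        apply String.toList_eq_nil_iff.mp
        apply List.length_eq_zero_iff.mp
        simp only [beq_iff_eq] at hs
        omega
      simp [hsz]
  · have hp : (("" : String).toList.length == M) = false := by
      rw [h0]
      simp only [beq_eq_false_iff_ne, ne_eq]
      exact hM
    simp only [List.find?, hp]
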